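-- pv_equiv track=rewrite | github.com/research-hyperion/hyperion-rest-server | rest_api_server.py | get_interaction_pairs_from_list
-- ===== SOURCE A (Python) =====
-- def get_interaction_pairs_from_list(drug_list):
--     interaction_pairs=[]
--     for drug1 in drug_list:
--         for drug2 in drug_list:
--             if drug1==drug2:
--                 continue
--             elif (drug1,drug2) in interaction_pairs or (drug2,drug1) in interaction_pairs:
--                 continue
--             else:
--                 interaction_pairs.append((drug1,drug2))
--     return interaction_pairs
-- ===== SOURCE B (Python) =====
-- def _comb2(u):
--     if not u:
--         return []
--     x, rest = u[0], u[1:]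
--     return [(x, y) for y in rest] + _comb2(rest)
--
-- def get_interaction_pairs_from_list(drug_list):
--     unique = []
--     for drug in drug_list:
--         if drug not in unique:
--             unique.append(drug)
--     return _comb2(unique)
-- ===== Notes on version B (the rewrite author's own statement) =====
-- stated objective: faster
-- what changed: Instead of scanning all n^2 ordered pairs and checking both orientations against the growing output list, B builds the list of distinct drugs in first-appearance order once and then enumerates its 2-combinations directly.
import Mathlib
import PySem

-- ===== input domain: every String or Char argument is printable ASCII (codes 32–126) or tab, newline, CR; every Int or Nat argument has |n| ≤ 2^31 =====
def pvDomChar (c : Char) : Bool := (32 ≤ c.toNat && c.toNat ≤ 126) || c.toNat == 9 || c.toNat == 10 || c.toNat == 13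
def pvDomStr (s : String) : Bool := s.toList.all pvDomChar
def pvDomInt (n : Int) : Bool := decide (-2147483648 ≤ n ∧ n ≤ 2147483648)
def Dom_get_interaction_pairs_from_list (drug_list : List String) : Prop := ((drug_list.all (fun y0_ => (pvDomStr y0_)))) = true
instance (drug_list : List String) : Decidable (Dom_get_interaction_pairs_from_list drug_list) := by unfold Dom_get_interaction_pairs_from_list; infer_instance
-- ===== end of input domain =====

-- B replaces A's n²-pair scan with membership checks on the growing output by an
-- order-preserving dedup followed by one enumeration of combinations (objective: faster).

-- ===== PORT A =====
-- body of A's inner loop, as a step function of the inner fold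
def pvInnerStep (d1 : String) (acc : List (String × String)) (d2 : String) :
    List (String × String) :=
  if d1 = d2 then acc
  else if (d1, d2) ∈ acc ∨ (d2, d1) ∈ acc then acc
  else acc ++ [(d1, d2)]

def get_interaction_pairs_from_list (drug_list : List String) : List (String × String) :=
  drug_list.foldl (fun acc d1 => drug_list.foldl (pvInnerStep d1) acc) []

-- ===== PORT B =====
-- step of B's dedup loop (append on first occurrence)
def pvUniqStep (u : List String) (d : String) : List String :=
  if d ∈ u then u else u ++ [d]

-- B's _comb2: pair the head with every later element, recurse on the tail
def pvComb2 : List String → List (String × String)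
  | [] => []
  | x :: xs => xs.map (fun y => (x, y)) ++ pvComb2 xs

def get_interaction_pairs_from_list_alt (drug_list : List String) : List (String × String) :=
  pvComb2 (drug_list.foldl pvUniqStep [])

-- ===== PRECONDITION & SPEC =====
def Spec_get_interaction_pairs_from_list (drug_list : List String) (out : List (String × String)) : Prop := out = get_interaction_pairs_from_list_alt drug_list
instance (drug_list : List String) (out : List (String × String)) : Decidable (Spec_get_interaction_pairs_from_list drug_list out) := by unfold Spec_get_interaction_pairs_from_list; infer_instance

-- ===== CLAIM (what is proved, stated in full; the proofs are below) =====
def Claim_equal_get_interaction_pairs_from_list : Prop := ∀ (drug_list : List String), Dom_get_interaction_pairs_from_list drug_list → Spec_get_interaction_pairs_from_list drug_list (get_interaction_pairs_from_list drug_list)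

-- ===== LEMMAS AND PROOFS =====

-- `partial P R`: the pairs A has accumulated once the distinct values in P have been
-- processed as drug1, with R the distinct values not yet processed (uniq L = P ++ R).
def pvPartial : List String → List String → List (String × String)
  | [], _ => []
  | x :: P, R => (P ++ R).map (fun y => (x, y)) ++ pvPartial P R

-- the dedup-collect that the inner loop of a fresh drug1 performs over L, restricted to R'
def pvCollect (R' : List String) (T : List String) (M : List String) : List String :=
  M.foldl (fun t d => if d ∈ R' ∧ d ∉ t then t ++ [d] else t) T

theorem pvPartial_nil (P : List String) : pvPartial P [] = pvComb2 P := by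
  induction P with
  | nil => rfl
  | cons x P ih => simp [pvPartial, pvComb2, ih]

theorem pvPartial_snoc (P : List String) (d : String) (R : List String) :
    pvPartial (P ++ [d]) R = pvPartial P (d :: R) ++ R.map (fun y => (d, y)) := by
  induction P with
  | nil => simp [pvPartial]
  | cons x P ih => simp [pvPartial, ih]

theorem fst_mem_pvPartial {P R : List String} {x y : String}
    (h : (x, y) ∈ pvPartial P R) : x ∈ P := by
  induction P with
  | nil => simp [pvPartial] at h
  | cons a P ih =>
    simp only [pvPartial, List.mem_append, List.mem_map] at h
    rcases h with ⟨z, _, hz⟩ | h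
    · cases hz; simp
    · exact List.mem_cons_of_mem _ (ih h)

theorem mem_pvPartial_left {P R : List String} {x y : String}
    (hx : x ∈ P) (hy : y ∈ R) : (x, y) ∈ pvPartial P R := by
  induction P with
  | nil => simp at hx
  | cons a P ih =>
    rcases List.mem_cons.1 hx with rfl | hx
    · exact List.mem_append.2 (Or.inl (List.mem_map.2 ⟨y, List.mem_append.2 (Or.inr hy), rfl⟩))
    · exact List.mem_append.2 (Or.inr (ih hx))

theorem pair_covered {P R : List String} {d1 d2 : String}
    (h1 : d1 ∈ P) (h2 : d2 ∈ P ++ R) (hne : d2 ≠ d1) :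
    (d1, d2) ∈ pvPartial P R ∨ (d2, d1) ∈ pvPartial P R := by
  induction P with
  | nil => simp at h1
  | cons a P ih =>
    rcases List.mem_cons.1 h1 with h1a | h1P
    · left
      rw [h1a, pvPartial]
      refine List.mem_append.2 (Or.inl (List.mem_map.2 ⟨d2, ?_, rfl⟩))
      rcases List.mem_append.1 h2 with h | h
      · rcases List.mem_cons.1 h with h' | h'
        · exact absurd (h'.trans h1a.symm) hne
        · exact List.mem_append.2 (Or.inl h')
      · exact List.mem_append.2 (Or.inr h)
    · by_cases hda : d2 = a
      · right
        rw [pvPartial, hda]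
        exact List.mem_append.2 (Or.inl (List.mem_map.2 ⟨d1, List.mem_append.2 (Or.inl h1P), rfl⟩))
      · have h2' : d2 ∈ P ++ R := by
          rcases List.mem_append.1 h2 with h | h
          · rcases List.mem_cons.1 h with h' | h'
            · exact absurd h' hda
            · exact List.mem_append.2 (Or.inl h')
          · exact List.mem_append.2 (Or.inr h)
        rcases ih h1P h2' with h | h
        · exact Or.inl (List.mem_append.2 (Or.inr h))
        · exact Or.inr (List.mem_append.2 (Or.inr h))

-- duplicates of already-processed values leave the accumulator unchanged
theorem inner_dup {d1 : String} {acc : List (String × String)} :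
    ∀ {M : List String},
      (∀ d2 ∈ M, d1 = d2 ∨ (d1, d2) ∈ acc ∨ (d2, d1) ∈ acc) →
      M.foldl (pvInnerStep d1) acc = acc := by
  intro M
  induction M with
  | nil => intro _; rfl
  | cons m M ih =>
    intro h
    have hm := h m (List.mem_cons_self)
    have hstep : pvInnerStep d1 acc m = acc := by
      unfold pvInnerStep
      rcases hm with rfl | hm
      · simp
      · by_cases he : d1 = m
        · simp [he]
        · simp [he, hm]
    simpa [List.foldl_cons, hstep] using ih (fun d2 hd2 => h d2 (List.mem_cons_of_mem _ hd2))

-- the inner loop for a fresh drug1 = r0 appends exactly the collect of R'-elements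
theorem inner_fresh {P R' : List String} {r0 : String}
    (hnd : (P ++ r0 :: R').Nodup) :
    ∀ (M : List String) (T : List String), (∀ x ∈ M, x ∈ P ++ r0 :: R') → (∀ x ∈ T, x ∈ R') →
      M.foldl (pvInnerStep r0) (pvPartial P (r0 :: R') ++ T.map (fun y => (r0, y))) =
        pvPartial P (r0 :: R') ++ (pvCollect R' T M).map (fun y => (r0, y)) := by
  intro M
  induction M with
  | nil => intro T _ _; rfl
  | cons m M ih =>
    intro T hM hT
    have hr0P : r0 ∉ P := by
      have := (List.nodup_append.1 hnd).2.2
      intro hc; exact this _ hc _ List.mem_cons_self rfl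
    have hstep :
        pvInnerStep r0 (pvPartial P (r0 :: R') ++ T.map (fun y => (r0, y))) m =
          pvPartial P (r0 :: R') ++
            (if m ∈ R' ∧ m ∉ T then T ++ [m] else T).map (fun y => (r0, y)) := by
      unfold pvInnerStep
      by_cases he : r0 = m
      · -- m = r0 : skipped; r0 ∉ R' by nodup
        have hmR : m ∉ R' := by
          subst he
          have := List.Nodup.of_append_right hnd
          exact (List.nodup_cons.1 this).1
        simp [he, hmR]
      · have hm := hM m List.mem_cons_self
        by_cases hmP : m ∈ P
        · -- pair already present as (m, r0)
          have hpres : (m, r0) ∈ pvPartial P (r0 :: R') :=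
            mem_pvPartial_left hmP List.mem_cons_self
          have hmR : m ∉ R' := by
            intro hc
            have := (List.nodup_append.1 hnd).2.2
            exact this _ hmP _ (List.mem_cons_of_mem _ hc) rfl
          simp [he, hpres, hmR]
        · -- m ∈ R'
          have hmR : m ∈ R' := by
            rcases List.mem_append.1 hm with h | h
            · exact absurd h hmP
            · rcases List.mem_cons.1 h with rfl | h
              · exact absurd rfl he
              · exact h
          have hfwd : (r0, m) ∈ pvPartial P (r0 :: R') ++ T.map (fun y => (r0, y)) ↔ m ∈ T := by
            constructor
            · intro h
              rcases List.mem_append.1 h with h | h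
              · exact absurd (fst_mem_pvPartial h) hr0P
              · rcases List.mem_map.1 h with ⟨z, hz, hze⟩
                cases hze; exact hz
            · intro h
              exact List.mem_append.2 (Or.inr (List.mem_map.2 ⟨m, h, rfl⟩))
          have hbwd : (m, r0) ∉ pvPartial P (r0 :: R') ++ T.map (fun y => (r0, y)) := by
            intro h
            rcases List.mem_append.1 h with h | h
            · have hmP' := fst_mem_pvPartial h
              have := (List.nodup_append.1 hnd).2.2
              exact this _ hmP' _ (List.mem_cons_of_mem _ hmR) rfl
            · rcases List.mem_map.1 h with ⟨z, _, hze⟩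
              cases hze
              exact he rfl
          by_cases hmT : m ∈ T
          · simp [he, hfwd.2 hmT, hmR, hmT]
          · have hnone : ¬ ((r0, m) ∈ pvPartial P (r0 :: R') ++ T.map (fun y => (r0, y)) ∨
                (m, r0) ∈ pvPartial P (r0 :: R') ++ T.map (fun y => (r0, y))) := by
              rintro (h | h)
              · exact hmT (hfwd.1 h)
              · exact hbwd h
            rw [if_neg he, if_neg hnone, if_pos ⟨hmR, hmT⟩]
            simp
    have hT' : ∀ x ∈ (if m ∈ R' ∧ m ∉ T then T ++ [m] else T), x ∈ R' := by
      split_ifs with hc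
      · intro x hx
        rcases List.mem_append.1 hx with hx | hx
        · exact hT x hx
        · rcases List.mem_singleton.1 hx with rfl; exact hc.1
      · exact hT
    have := ih (if m ∈ R' ∧ m ∉ T then T ++ [m] else T)
      (fun x hx => hM x (List.mem_cons_of_mem _ hx)) hT'
    simpa [List.foldl_cons, hstep, pvCollect] using this

-- collecting under a predicate p (membership in R') equals filtering the dedup
theorem collect_filter (p : String → Prop) [DecidablePred p] :
    ∀ (M : List String) (u t : List String), t = u.filter (fun x => decide (p x)) →
      M.foldl (fun t d => if p d ∧ d ∉ t then t ++ [d] else t) t =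
        (M.foldl pvUniqStep u).filter (fun x => decide (p x)) := by
  intro M
  induction M with
  | nil => intro u t ht; simpa using ht
  | cons m M ih =>
    intro u t ht
    have hsub : ∀ x ∈ t, x ∈ u := by
      intro x hx; subst ht; exact (List.mem_filter.1 hx).1
    by_cases hmu : m ∈ u
    · have hstep : pvUniqStep u m = u := by simp [pvUniqStep, hmu]
      have htt : (if p m ∧ m ∉ t then t ++ [m] else t) = t := by
        split_ifs with hc
        · exfalso
          exact hc.2 (ht ▸ List.mem_filter.2 ⟨hmu, by simpa using hc.1⟩)
        · rfl
      simpa [List.foldl_cons, hstep, htt] using ih u t ht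
    · have hstep : pvUniqStep u m = u ++ [m] := by simp [pvUniqStep, hmu]
      have hmt : m ∉ t := fun hc => hmu (hsub m hc)
      have ht' : (if p m ∧ m ∉ t then t ++ [m] else t) =
          (u ++ [m]).filter (fun x => decide (p x)) := by
        by_cases hp : p m
        · simp [hp, hmu, List.filter_append, ht]
        · simp [hp, List.filter_append, ht]
      simpa [List.foldl_cons, hstep] using ih (u ++ [m]) _ ht'

-- uniq facts
theorem uniq_mono (M u : List String) : ∃ v, M.foldl pvUniqStep u = u ++ v := by
  induction M generalizing u with
  | nil => exact ⟨[], by simp⟩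
  | cons m M ih =>
    by_cases hm : m ∈ u
    · simpa [List.foldl_cons, pvUniqStep, hm] using ih u
    · rcases ih (u ++ [m]) with ⟨v, hv⟩
      exact ⟨m :: v, by simp [List.foldl_cons, pvUniqStep, hm, hv]⟩

theorem uniq_nodup (M : List String) : ∀ u : List String, u.Nodup →
    (M.foldl pvUniqStep u).Nodup := by
  intro u
  induction M generalizing u with
  | nil => intro h; exact h
  | cons m M ih =>
    intro h
    by_cases hm : m ∈ u
    · simpa [List.foldl_cons, pvUniqStep, hm] using ih u h
    · have : (u ++ [m]).Nodup :=
        List.Nodup.append h (List.nodup_singleton m) (List.disjoint_singleton.2 hm)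
      simpa [List.foldl_cons, pvUniqStep, hm] using ih (u ++ [m]) this

theorem mem_uniq_of_mem (M : List String) : ∀ (u : List String) (x : String), x ∈ M →
    x ∈ M.foldl pvUniqStep u := by
  induction M with
  | nil => intro _ _ h; simp at h
  | cons m M ih =>
    intro u x hx
    rcases List.mem_cons.1 hx with rfl | hx
    · by_cases hm : x ∈ u
      · rcases uniq_mono M u with ⟨v, hv⟩
        simp [List.foldl_cons, pvUniqStep, hv, List.mem_append, hm]
      · rcases uniq_mono M (u ++ [x]) with ⟨v, hv⟩
        simp [List.foldl_cons, pvUniqStep, hm, hv]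
    · by_cases hm : m ∈ u
      · simpa [List.foldl_cons, pvUniqStep, hm] using ih u x hx
      · simpa [List.foldl_cons, pvUniqStep, hm] using ih (u ++ [m]) x hx

-- ===== main invariant =====
theorem outer_inv (L : List String) :
    ∀ (M C R : List String), L = C ++ M →
      L.foldl pvUniqStep [] = (C.foldl pvUniqStep []) ++ R →
      M.foldl (fun acc d1 => L.foldl (pvInnerStep d1) acc) (pvPartial (C.foldl pvUniqStep []) R)
        = pvComb2 (L.foldl pvUniqStep []) := by
  intro M
  induction M with
  | nil =>
    intro C R hL hR
    have hC : C = L := by simpa using hL.symm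
    subst hC
    have hR0 : R = [] := by
      have h2 : C.foldl pvUniqStep [] ++ R = C.foldl pvUniqStep [] ++ ([] : List String) := by
        simp [← hR]
      exact List.append_cancel_left h2
    subst hR0
    simp [pvPartial_nil]
  | cons d1 M' ih =>
    intro C R hL hR
    have hL' : L = (C ++ [d1]) ++ M' := by simpa using hL
    have hmemU : ∀ x ∈ L, x ∈ (C.foldl pvUniqStep []) ++ R := by
      intro x hx
      rw [← hR]; exact mem_uniq_of_mem L [] x hx
    by_cases hd : d1 ∈ C.foldl pvUniqStep []
    · -- duplicate drug1: inner loop does nothing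
      have hC' : (C ++ [d1]).foldl pvUniqStep [] = C.foldl pvUniqStep [] := by
        simp [List.foldl_append, pvUniqStep, hd]
      have hin : L.foldl (pvInnerStep d1) (pvPartial (C.foldl pvUniqStep []) R)
          = pvPartial (C.foldl pvUniqStep []) R := by
        apply inner_dup
        intro d2 hd2
        by_cases he : d1 = d2
        · exact Or.inl he
        · exact Or.inr (pair_covered hd (hmemU d2 hd2) (fun hc => he hc.symm))
      have := ih (C ++ [d1]) R hL' (by rw [hC']; exact hR)
      rw [hC'] at this
      simpa [List.foldl_cons, hin] using this
    · -- fresh drug1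
      have hC' : (C ++ [d1]).foldl pvUniqStep [] = C.foldl pvUniqStep [] ++ [d1] := by
        simp [List.foldl_append, pvUniqStep, hd]
      obtain ⟨v, hv⟩ := uniq_mono M' ((C ++ [d1]).foldl pvUniqStep [])
      have hu' : L.foldl pvUniqStep [] = (C.foldl pvUniqStep [] ++ [d1]) ++ v := by
        rw [hL', List.foldl_append]
        rw [hv, hC']
      have hRv : R = d1 :: v := by
        have : C.foldl pvUniqStep [] ++ R
            = C.foldl pvUniqStep [] ++ (d1 :: v) := by
          rw [← hR, hu']; simp
        exact List.append_cancel_left this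
      subst hRv
      have hnd : ((C.foldl pvUniqStep []) ++ d1 :: v).Nodup := by
        have := uniq_nodup L [] List.nodup_nil
        rw [hu'] at this; simpa using this
      have hin : L.foldl (pvInnerStep d1) (pvPartial (C.foldl pvUniqStep []) (d1 :: v))
          = pvPartial (C.foldl pvUniqStep []) (d1 :: v) ++ (pvCollect v [] L).map (fun y => (d1, y)) := by
        have := inner_fresh (P := C.foldl pvUniqStep []) (R' := v) (r0 := d1) hnd L []
          (by intro x hx; simpa using hmemU x hx) (by intro x hx; simp at hx)
        simpa using this
      have hcol : pvCollect v [] L = v := by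
        have hfil := collect_filter (p := fun x => x ∈ v) L [] [] (by simp)
        have hdisj : ∀ x ∈ C.foldl pvUniqStep [], x ∉ v := by
          intro x hx hxv
          have := (List.nodup_append.1 hnd).2.2
          exact this _ hx _ (List.mem_cons_of_mem _ hxv) rfl
        have hd1v : d1 ∉ v := by
          have := List.Nodup.of_append_right hnd
          exact (List.nodup_cons.1 this).1
        unfold pvCollect
        rw [hfil, hu']
        rw [List.filter_append, List.filter_append]
        rw [List.filter_eq_nil_iff.2 (by intro x hx; simpa using hdisj x hx)]
        simp [hd1v, List.filter_eq_self]
      rw [hcol] at hin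
      have hacc : pvPartial (C.foldl pvUniqStep []) (d1 :: v) ++ v.map (fun y => (d1, y))
          = pvPartial ((C ++ [d1]).foldl pvUniqStep []) v := by
        rw [hC', pvPartial_snoc]
      have := ih (C ++ [d1]) v hL' (by rw [hC']; simpa using hu')
      rw [← this]
      simp [List.foldl_cons, hin, hacc]

-- ===== VERDICT (by name: the statement is the Claim_ definition above) =====
theorem get_interaction_pairs_from_list_spec : Claim_equal_get_interaction_pairs_from_list := by
  intro L _
  unfold Spec_get_interaction_pairs_from_list get_interaction_pairs_from_list get_interaction_pairs_from_list_alt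
  have := outer_inv L L [] (L.foldl pvUniqStep []) (by simp) (by simp)
  simpa [pvPartial] using this
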